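-- pv_equiv track=rewrite | github.com/cavince/Character-Rain | character_rain_animated.py | create_output_string
-- ===== SOURCE A (Python) =====
-- def create_output_string(charlist, string_length):
-- 	output = ''
-- 	for i in range(string_length):
-- 		for x in charlist:
-- 			char = x[0]
-- 			offset = x[1]
-- 			if offset == i:
-- 				output += char
-- 			else:
-- 				output += ' '
-- 		output += '\n'
-- 	return output
-- ===== SOURCE B (Python) =====
-- def create_output_string(charlist, string_length):
-- 	rows = [[' '] * len(charlist) for _ in range(max(string_length, 0))]
-- 	col = 0
-- 	for ch, off in charlist:
-- 		if 0 <= off < string_length: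
-- 			rows[off][col] = ch
-- 		col += 1
-- 	return ''.join(''.join(r) + '\n' for r in rows)
-- ===== Notes on version B (the rewrite author's own statement) =====
-- stated objective: faster
-- what changed: Instead of scanning every (row, column) cell testing offset == i (O(rows*cols) comparisons), B allocates a blank grid and scatters each character directly into its target row in one pass over charlist, then joins the rows.
import Mathlib
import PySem

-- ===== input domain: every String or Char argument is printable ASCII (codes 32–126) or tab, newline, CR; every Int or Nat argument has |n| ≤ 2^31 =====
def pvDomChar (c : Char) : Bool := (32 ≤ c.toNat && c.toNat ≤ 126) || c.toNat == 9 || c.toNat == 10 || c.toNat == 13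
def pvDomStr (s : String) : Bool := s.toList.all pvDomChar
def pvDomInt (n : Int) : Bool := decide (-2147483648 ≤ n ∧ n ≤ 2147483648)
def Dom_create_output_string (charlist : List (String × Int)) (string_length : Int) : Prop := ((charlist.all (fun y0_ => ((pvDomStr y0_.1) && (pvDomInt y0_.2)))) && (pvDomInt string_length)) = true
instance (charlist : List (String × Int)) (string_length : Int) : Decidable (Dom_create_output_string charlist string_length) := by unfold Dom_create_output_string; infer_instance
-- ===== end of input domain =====

-- B scatters each character directly into its target row of a pre-allocated blank grid in
-- one pass over charlist, instead of A's scan of every (row, column) cell testing offset == i.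


-- ===== PORT A =====
def create_output_string (charlist : List (String × Int)) (string_length : Int) : String :=
  (PySem.List.pyRange 0 string_length 1).foldl
    (fun output i =>
      (charlist.foldl
        (fun output x =>
          let char := x.1
          let offset := x.2
          if offset == i then output ++ char else output ++ " ")
        output) ++ "\n")
    ""

-- ===== PORT B =====
-- the `for ch, off in charlist` loop of Source B (col is the running column index)
def pvScatter (string_length : Int) : List (String × Int) → Nat → List (List String) → List (List String)
  | [], _, rows => rows
  | (ch, off) :: rest, col, rows =>
      pvScatter string_length rest (col + 1)
        (if 0 ≤ off ∧ off < string_length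
         then rows.set off.toNat ((rows.getD off.toNat []).set col ch)
         else rows)

def create_output_string_alt (charlist : List (String × Int)) (string_length : Int) : String :=
  let rows0 : List (List String) :=
    List.replicate (max string_length 0).toNat (List.replicate charlist.length " ")
  let rows := pvScatter string_length charlist 0 rows0
  PySem.Str.join "" (rows.map (fun r => PySem.Str.join "" r ++ "\n"))

-- ===== PRECONDITION & SPEC =====
def Spec_create_output_string (charlist : List (String × Int)) (string_length : Int) (out : String) : Prop := out = create_output_string_alt charlist string_length
instance (charlist : List (String × Int)) (string_length : Int) (out : String) : Decidable (Spec_create_output_string charlist string_length out) := by unfold Spec_create_output_string; infer_instance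

-- ===== CLAIM (what is proved, stated in full; the proofs are below) =====
def Claim_equal_create_output_string : Prop := ∀ (charlist : List (String × Int)) (string_length : Int), Dom_create_output_string charlist string_length → Spec_create_output_string charlist string_length (create_output_string charlist string_length)

-- ===== LEMMAS AND PROOFS =====

def gfun (i : Nat) (x : String × Int) : String := if x.2 == (i : Int) then x.1 else " "

-- one output row as A builds it, for row index i
def rowStr (i : Int) : List (String × Int) → String
  | [] => ""
  | x :: cs => (if x.2 == i then x.1 else " ") ++ rowStr i cs

-- whole output as A builds it, over the list of row indices
def colStr (cl : List (String × Int)) : List Int → String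
  | [] => ""
  | i :: l => (rowStr i cl ++ "\n") ++ colStr cl l

lemma join_empty_nil : PySem.Str.join "" ([] : List String) = "" := by
  apply String.toList_inj.mp
  simp [PySem.Str.join, PySem.Chars.join, List.intercalate]

lemma nil_intercalate (l : List (List Char)) : [].intercalate l = l.flatten := by
  induction l with
  | nil => rfl
  | cons a l ih => cases l <;> simp_all [List.intercalate]

lemma join_empty_cons (a : String) (l : List String) :
    PySem.Str.join "" (a :: l) = a ++ PySem.Str.join "" l := by
  apply String.toList_inj.mp
  simp [PySem.Str.join, PySem.Chars.join, nil_intercalate]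

lemma A_inner (i : Int) (cs : List (String × Int)) (o : String) :
    cs.foldl (fun output x =>
        let char := x.1
        let offset := x.2
        if offset == i then output ++ char else output ++ " ") o = o ++ rowStr i cs := by
  induction cs generalizing o with
  | nil => simp [rowStr]
  | cons x cs ih =>
      rw [List.foldl_cons, ih, rowStr]
      show (if x.2 == i then o ++ x.1 else o ++ " ") ++ rowStr i cs = _
      split <;> rw [String.append_assoc]

lemma A_outer (cl : List (String × Int)) (l : List Int) (o : String) :
    l.foldl (fun output i =>
      (cl.foldl (fun output x =>
        let char := x.1
        let offset := x.2
        if offset == i then output ++ char else output ++ " ") output) ++ "\n") o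
    = o ++ colStr cl l := by
  induction l generalizing o with
  | nil => simp [colStr]
  | cons i l ih =>
      rw [List.foldl_cons, ih, A_inner]
      simp [colStr, String.append_assoc]

lemma rowStr_join (cl : List (String × Int)) (k : Nat) :
    rowStr (Int.ofNat k) cl = PySem.Str.join "" (cl.map (gfun k)) := by
  induction cl with
  | nil => simp [rowStr, join_empty_nil]
  | cons x cs ih =>
      rw [rowStr, ih]
      simp [join_empty_cons, gfun, Int.ofNat_eq_natCast]

lemma colStr_join (cl : List (String × Int)) (l : List Nat) :
    colStr cl (l.map Int.ofNat)
    = PySem.Str.join "" ((l.map (fun i => cl.map (gfun i))).map (fun r => PySem.Str.join "" r ++ "\n")) := by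
  induction l with
  | nil => simp [colStr, join_empty_nil]
  | cons k l ih =>
      simp only [List.map_cons, colStr, join_empty_cons]
      rw [ih, rowStr_join]

lemma scatter_eq (sl : Int) (cs : List (String × Int)) :
    ∀ (col : Nat) (rows : List (List String)),
    rows.length = sl.toNat →
    (∀ r ∈ rows, r.drop col = List.replicate cs.length " ") →
    pvScatter sl cs col rows
      = (List.range rows.length).map (fun i => (rows.getD i []).take col ++ cs.map (gfun i)) := by
  induction cs with
  | nil =>
      intro col rows hlen hdrop
      simp only [pvScatter, List.map_nil, List.append_nil]
      symm
      apply List.ext_getElem (by simp)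
      intro i h1 h2
      simp only [List.getElem_map, List.getElem_range]
      have hi : i < rows.length := by simpa using h2
      have hr := hdrop rows[i] (List.getElem_mem hi)
      have : rows[i].length ≤ col := by
        by_contra hc
        push_neg at hc
        have : rows[i].drop col ≠ [] := by simp [List.drop_eq_nil_iff]; omega
        exact this hr
      simp [List.getD_eq_getElem?_getD, List.getElem?_eq_getElem hi, List.take_of_length_le this]
  | cons x cs ih =>
      intro col rows hlen hdrop
      obtain ⟨ch, off⟩ := x
      simp only [pvScatter]
      have hrowfact : ∀ r ∈ rows, r.drop col = " " :: List.replicate cs.length " " := by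
        intro r hr; simpa [List.replicate] using hdrop r hr
      have hcollt : ∀ r ∈ rows, col < r.length := by
        intro r hr
        by_contra hc
        push_neg at hc
        have := hrowfact r hr
        rw [List.drop_of_length_le hc] at this
        exact (List.cons_ne_nil _ _) this.symm
      set rows' := (if 0 ≤ off ∧ off < sl
         then rows.set off.toNat ((rows.getD off.toNat []).set col ch)
         else rows) with hrows'
      have hlen' : rows'.length = rows.length := by
        rw [hrows']; split <;> simp
      have hmem' : ∀ r' ∈ rows', r' ∈ rows ∨ ∃ r ∈ rows, r' = r.set col ch := by
        intro r' hr'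
        rw [hrows'] at hr'
        split at hr'
        · rcases List.mem_or_eq_of_mem_set hr' with h | h
          · exact Or.inl h
          · rename_i hg
            have hk : off.toNat < rows.length := by omega
            right
            refine ⟨rows[off.toNat], List.getElem_mem hk, ?_⟩
            rw [h]
            simp [List.getD_eq_getElem?_getD, List.getElem?_eq_getElem hk]
        · exact Or.inl hr'
      have hdrop' : ∀ r' ∈ rows', r'.drop (col + 1) = List.replicate cs.length " " := by
        intro r' hr'
        rcases hmem' r' hr' with h | ⟨r, hr, rfl⟩
        · rw [← List.drop_drop]
          simp [hrowfact r' h]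
        · rw [List.drop_set_of_lt (by omega), ← List.drop_drop]
          simp [hrowfact r hr]
      rw [ih (col + 1) rows' (by omega) hdrop', hlen']
      apply List.map_congr_left
      intro i hi
      have hi' : i < rows.length := by simpa using hi
      have hgr : rows.getD i [] = rows[i] := by
        simp [List.getD_eq_getElem?_getD, List.getElem?_eq_getElem hi']
      have hmemi : rows[i] ∈ rows := List.getElem_mem hi'
      have hcolI : col < rows[i].length := hcollt _ hmemi
      have htake : rows[i].take (col + 1) = rows[i].take col ++ [" "] := by
        rw [List.take_add_one]
        have h1 : rows[i][col]? = (rows[i].drop col)[0]? := by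
          simp [List.getElem?_drop]
        rw [h1, hrowfact _ hmemi]
        rfl
      by_cases hg : 0 ≤ off ∧ off < sl
      · by_cases heq : off.toNat = i
        · -- the scattered row
          have hoff : off = (i : Int) := by omega
          have hset : rows'.getD i [] = rows[i].set col ch := by
            rw [hrows']
            simp only [if_pos hg, heq, hgr]
            simp [List.getD_eq_getElem?_getD, List.getElem?_set_self, hi', hgr]
          have htakeset : (rows[i].set col ch).take (col + 1) = rows[i].take col ++ [ch] := by
            rw [List.set_eq_take_append_cons_drop, if_pos hcolI, List.take_append]
            simp [List.take_take, Nat.min_eq_left (Nat.le_of_lt hcolI)]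
          rw [hset, htakeset, hgr]
          simp [gfun, hoff, List.append_assoc]
        · -- guard true, other row
          have hset : rows'.getD i [] = rows[i] := by
            rw [hrows']
            simp only [if_pos hg]
            simp [List.getD_eq_getElem?_getD, List.getElem?_set_ne heq, List.getElem?_eq_getElem hi']
          have hoff : off ≠ (i : Int) := by omega
          rw [hset, htake, hgr]
          simp [gfun, hoff, List.append_assoc]
      · -- guard false
        have hset : rows'.getD i [] = rows[i] := by rw [hrows', if_neg hg, hgr]
        have hoff : off ≠ (i : Int) := by
          intro h
          apply hg
          constructor <;> omega
        rw [hset, htake, hgr]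
        simp [gfun, hoff, List.append_assoc]

lemma B_eq (cl : List (String × Int)) (sl : Int) :
    create_output_string_alt cl sl
    = PySem.Str.join "" (((List.range sl.toNat).map (fun i => cl.map (gfun i))).map
        (fun r => PySem.Str.join "" r ++ "\n")) := by
  have hmax : (max sl 0).toNat = sl.toNat := by omega
  have h := scatter_eq sl cl 0
    (List.replicate (max sl 0).toNat (List.replicate cl.length " "))
    (by simp [hmax])
    (by intro r hr; rw [List.eq_of_mem_replicate hr]; simp)
  show PySem.Str.join "" ((pvScatter sl cl 0
      (List.replicate (max sl 0).toNat (List.replicate cl.length " "))).map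
        (fun r => PySem.Str.join "" r ++ "\n")) = _
  rw [h]
  simp [hmax]

-- ===== VERDICT (by name: the statement is the Claim_ definition above) =====
theorem create_output_string_spec : Claim_equal_create_output_string := by
  intro cl sl _
  unfold Spec_create_output_string create_output_string
  rw [A_outer, String.empty_append, B_eq]
  have hr : PySem.List.pyRange 0 sl 1 = (List.range sl.toNat).map Int.ofNat := by
    have h0 : (sl - 0).toNat = sl.toNat := by omega
    rw [PySem.List.pyRange_one, h0]
    exact List.map_congr_left (fun a _ => by simp [Int.ofNat_eq_natCast])
  rw [hr, colStr_join]
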